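-- pv_equiv track=rewrite | github.com/salargtb/task_vrptw_2024 | LA/util_LA.py | compute_a_k_wvr
-- ===== SOURCE A (Python) =====
-- def compute_a_k_wvr(u, routes_u, N_k):
--     """
--     Computes a_{w,v,r}^k for a single customer 'u',
--     given:
--       - routes_u: the set (or list) of route tuples that visit 'u' (i.e., R[u])
--       - neighbor_list_u: the sorted list of neighbors for 'u' (i.e., neighborhoods[u])
--
--     Returns a dict: {(k, w, v, r_tuple): 0 or 1}
--     """
--     a_k_wvr = {}  # keyed by (k, w, v, route_tuple)
--
--     # Helper to check partial route membership
--     def partial_route_in_set(route_tuple, node_x, valid_set):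
--         if node_x not in route_tuple:
--             return False
--         idx = route_tuple.index(node_x)
--         for nd in route_tuple[:idx+1]:
--             if nd not in valid_set:
--                 return False
--         return True
--
--
--     # N_u^{k+} = N_k ∪ {u}
--     N_k_plus = set(N_k) | {u}
--
--     # For each route tuple in routes_u
--     for route_tuple in routes_u:
--         # For each w in N_k_plus and v in N_k
--         for w in N_k_plus:
--             for v in N_k:
--                 # Check partial route up to w in N_k_plus
--                 cond_w = partial_route_in_set(route_tuple, w, N_k_plus)
--                 # Check partial route up to v in N_k_plus
--                 cond_v = partial_route_in_set(route_tuple, v, N_k_plus)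
--
--                 val = 1 if (cond_w and cond_v) else 0
--                 a_k_wvr[(w, v, route_tuple)] = val
--
--     return a_k_wvr
-- ===== SOURCE B (Python) =====
-- def compute_a_k_wvr(u, routes_u, N_k):
--     """Same result as A: per route, a break-loop collects the set 'good' of
--     nodes occurring before the first node outside N_k_plus (exactly the nodes
--     whose first-occurrence prefix is valid), then flag tables for w and v make
--     every (w, v) pair two table reads."""
--     N_k_plus = set(N_k) | {u}
--     a = {}
--     for route in routes_u:
--         good = set()
--         for nd in route:
--             if nd not in N_k_plus:
--                 break
--             good.add(nd)
--         w_flags = [(w, w in good) for w in N_k_plus]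
--         v_flags = [(v, 1 if v in good else 0) for v in N_k]
--         for w, fw in w_flags:
--             for v, fv in v_flags:
--                 a[(w, v, route)] = fv if fw else 0
--     return a
-- ===== Notes on version B (the rewrite author's own statement) =====
-- stated objective: alternative
-- what changed: B replaces A's per-pair prefix rescans by one break-loop per route that collects the set of nodes before the first invalid node (exactly the nodes with a valid first-occurrence prefix) plus precomputed flag tables for w and v, so each (w,v) pair is two table reads instead of two O(L) scans.
import Mathlib
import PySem

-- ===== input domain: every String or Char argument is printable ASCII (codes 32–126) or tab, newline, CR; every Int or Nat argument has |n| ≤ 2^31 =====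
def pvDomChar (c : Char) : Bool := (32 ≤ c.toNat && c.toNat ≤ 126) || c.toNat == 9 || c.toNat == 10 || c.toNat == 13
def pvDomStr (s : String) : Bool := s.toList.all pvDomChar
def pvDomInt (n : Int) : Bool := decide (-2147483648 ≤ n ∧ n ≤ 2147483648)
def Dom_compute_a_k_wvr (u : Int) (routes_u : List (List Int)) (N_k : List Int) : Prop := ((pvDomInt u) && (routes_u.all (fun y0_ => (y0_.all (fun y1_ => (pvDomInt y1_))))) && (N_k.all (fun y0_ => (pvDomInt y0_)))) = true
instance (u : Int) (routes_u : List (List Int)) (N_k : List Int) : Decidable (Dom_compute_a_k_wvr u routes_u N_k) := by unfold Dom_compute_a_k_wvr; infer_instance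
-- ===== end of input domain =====

-- B replaces A's per-pair prefix rescans by one break-loop per route that
-- collects the set of nodes occurring before the first invalid node, plus
-- precomputed flag tables for w and v, so each (w, v) pair is two table reads.

-- ===== PORT A =====
-- helper 'partial_route_in_set' of A: membership test, first index, scan of route[:idx+1]
def partial_route_in_set (route : List Int) (x : Int) (s : PySem.Set Int) : Bool :=
  if !(route.contains x) then false
  else
    match PySem.List.index? route x with
    | none => false
    | some idx =>
        (PySem.List.slice route none (some ((idx : Int) + 1))).all
          (fun nd => PySem.Set.contains s nd)

def compute_a_k_wvr (u : Int) (routes_u : List (List Int)) (N_k : List Int) : List (Int × Int × List Int × Int) :=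
  let N_k_plus : PySem.Set Int := PySem.Set.union (PySem.Set.ofList N_k) [u]
  let d : PySem.Dict (Int × Int × List Int) Int :=
    routes_u.foldl (fun d route =>
      N_k_plus.foldl (fun d w =>
        N_k.foldl (fun d v =>
          let cond_w := partial_route_in_set route w N_k_plus
          let cond_v := partial_route_in_set route v N_k_plus
          d.insert (w, v, route) (if cond_w && cond_v then (1 : Int) else 0)) d) d)
      PySem.Dict.empty
  d.items.map (fun p => (p.1.1, p.1.2.1, p.1.2.2, p.2))

-- ===== PORT B =====
-- the break-loop: add nodes to 'good' until the first node outside s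
def goodLoop (s : PySem.Set Int) (acc : PySem.Set Int) : List Int → PySem.Set Int
  | [] => acc
  | nd :: rest =>
      if PySem.Set.contains s nd then goodLoop s (PySem.Set.add acc nd) rest else acc

def compute_a_k_wvr_alt (u : Int) (routes_u : List (List Int)) (N_k : List Int) : List (Int × Int × List Int × Int) :=
  let N_k_plus : PySem.Set Int := PySem.Set.union (PySem.Set.ofList N_k) [u]
  let a : PySem.Dict (Int × Int × List Int) Int :=
    routes_u.foldl (fun a route =>
      let good := goodLoop N_k_plus PySem.Set.empty route
      let w_flags := N_k_plus.map (fun w => (w, PySem.Set.contains good w))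
      let v_flags := N_k.map (fun v => (v, if PySem.Set.contains good v then (1 : Int) else 0))
      w_flags.foldl (fun a wf =>
        v_flags.foldl (fun a vf =>
          a.insert (wf.1, vf.1, route) (if wf.2 then vf.2 else 0)) a) a)
      PySem.Dict.empty
  a.items.map (fun p => (p.1.1, p.1.2.1, p.1.2.2, p.2))

-- ===== PRECONDITION & SPEC =====
def Spec_compute_a_k_wvr (u : Int) (routes_u : List (List Int)) (N_k : List Int) (out : List (Int × Int × List Int × Int)) : Prop := out = compute_a_k_wvr_alt u routes_u N_k
instance (u : Int) (routes_u : List (List Int)) (N_k : List Int) (out : List (Int × Int × List Int × Int)) : Decidable (Spec_compute_a_k_wvr u routes_u N_k out) := by unfold Spec_compute_a_k_wvr; infer_instance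

-- ===== CLAIM (what is proved, stated in full; the proofs are below) =====
def Claim_equal_compute_a_k_wvr : Prop := ∀ (u : Int) (routes_u : List (List Int)) (N_k : List Int), Dom_compute_a_k_wvr u routes_u N_k → Spec_compute_a_k_wvr u routes_u N_k (compute_a_k_wvr u routes_u N_k)

-- ===== LEMMAS AND PROOFS =====

-- recursive characterisation of A's helper
def prsRec (route : List Int) (x : Int) (s : PySem.Set Int) : Bool :=
  match route with
  | [] => false
  | nd :: rest =>
      if nd = x then PySem.Set.contains s nd
      else PySem.Set.contains s nd && prsRec rest x s

lemma partial_eq_prsRec (route : List Int) (x : Int) (s : PySem.Set Int) :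
    partial_route_in_set route x s = prsRec route x s := by
  induction route with
  | nil => simp [partial_route_in_set, prsRec]
  | cons nd rest ih =>
    by_cases hx : nd = x
    · subst hx
      simp only [partial_route_in_set, PySem.List.index?_cons_self]
      rw [show ((0 : Nat) : Int) + 1 = ((1 : Nat) : Int) by norm_num,
        PySem.List.slice_to_natCast]
      simp [prsRec]
    · rw [prsRec, ← ih]
      cases hi : PySem.List.index? rest x with
      | none =>
        have hmem : x ∉ rest := (PySem.List.index?_eq_none_iff rest x).mp hi
        simp only [partial_route_in_set, PySem.List.index?_cons_of_ne _ hx, hi]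
        simp [hx, hmem]
      | some k =>
        have hmem : x ∈ rest := by
          rw [← PySem.List.index?_isSome_iff, hi]; rfl
        simp only [partial_route_in_set, PySem.List.index?_cons_of_ne _ hx, hi, Option.map_some]
        rw [show (((k + 1 : Nat)) : Int) + 1 = (((k + 2 : Nat)) : Int) by push_cast; ring,
          PySem.List.slice_to_natCast]
        rw [show ((k : Nat) : Int) + 1 = (((k + 1 : Nat)) : Int) by push_cast; ring,
          PySem.List.slice_to_natCast]
        have h2 : k + 2 = (k + 1) + 1 := rfl
        simp [hx, hmem, h2, List.take_succ_cons]

-- what the break-loop's set contains, for any accumulator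
lemma goodLoop_contains (s : PySem.Set Int) (route : List Int) :
    ∀ (acc : PySem.Set Int) (x : Int),
      PySem.Set.contains (goodLoop s acc route) x =
        (PySem.Set.contains acc x || prsRec route x s) := by
  induction route with
  | nil => intro acc x; simp [goodLoop, prsRec]
  | cons nd rest ih =>
    intro acc x
    rw [goodLoop]
    by_cases hs : PySem.Set.contains s nd = true
    · have hmem : nd ∈ s := (PySem.Set.contains_iff s nd).mp hs
      rw [if_pos hs, ih]
      have hadd : PySem.Set.contains (PySem.Set.add acc nd) x =
          (PySem.Set.contains acc x || x = nd) := by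
        simp [PySem.Set.add_eq_ite]
        by_cases hm : nd ∈ acc <;> by_cases he : x = nd <;> simp [hm, he]
      rw [hadd, prsRec]
      by_cases he : nd = x
      · subst he; simp [hmem]
      · simp [he, Ne.symm he, hmem]
    · have hmem : nd ∉ s := fun h => hs ((PySem.Set.contains_iff s nd).mpr h)
      rw [if_neg hs, prsRec]
      by_cases he : nd = x
      · subst he
        simp [hmem]
      · simp [he, hmem]

@[simp] lemma goodLoop_contains_empty (s : PySem.Set Int) (route : List Int) (x : Int) :
    PySem.Set.contains (goodLoop s PySem.Set.empty route) x = partial_route_in_set route x s := by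
  rw [goodLoop_contains, partial_eq_prsRec]
  simp [PySem.Set.empty]

-- merging B's nested value tables into A's single conditional
lemma ite_and_int (cw cv : Bool) :
    (if cw then (if cv then (1 : Int) else 0) else 0) = (if cw && cv then 1 else 0) := by
  cases cw <;> simp

-- ===== VERDICT (by name: the statement is the Claim_ definition above) =====
theorem compute_a_k_wvr_spec : Claim_equal_compute_a_k_wvr := by
  intro u routes_u N_k _
  show compute_a_k_wvr u routes_u N_k = compute_a_k_wvr_alt u routes_u N_k
  simp only [compute_a_k_wvr, compute_a_k_wvr_alt, List.foldl_map,
    goodLoop_contains_empty, ite_and_int]
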